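-- pv_equiv track=rewrite | github.com/MarekUlip/CollegePythonScripts | MethodsForTextAnalysis/2seminar.py | BMH_preprocess
-- ===== SOURCE A (Python) =====
-- def BMH_preprocess(alphabet, pattern):
--     T = {}
--     pattern_len = len(pattern)
--     for i in alphabet:
--         T[i] = pattern_len
--     for i in range(pattern_len - 1):
--         T[pattern[i]] = pattern_len - 1 - i
--     return T
-- ===== SOURCE B (Python) =====
-- def BMH_preprocess(alphabet, pattern):
--     m = len(pattern)
--     body = pattern[:m - 1]
--     T = {}
--     for c in alphabet + body:
--         if c not in T:
--             r = body.rfind(c)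
--             T[c] = m - 1 - r if r >= 0 else m
--     return T
-- ===== Notes on version B (the rewrite author's own statement) =====
-- stated objective: alternative
-- what changed: B replaces A's two-pass overwrite scheme (default-fill the alphabet, then overwrite from the pattern) by one guarded pass over alphabet+pattern[:-1] that inserts each key at most once, computing its final shift directly in closed form via str.rfind (last occurrence), so no entry is ever overwritten.
import Mathlib
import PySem

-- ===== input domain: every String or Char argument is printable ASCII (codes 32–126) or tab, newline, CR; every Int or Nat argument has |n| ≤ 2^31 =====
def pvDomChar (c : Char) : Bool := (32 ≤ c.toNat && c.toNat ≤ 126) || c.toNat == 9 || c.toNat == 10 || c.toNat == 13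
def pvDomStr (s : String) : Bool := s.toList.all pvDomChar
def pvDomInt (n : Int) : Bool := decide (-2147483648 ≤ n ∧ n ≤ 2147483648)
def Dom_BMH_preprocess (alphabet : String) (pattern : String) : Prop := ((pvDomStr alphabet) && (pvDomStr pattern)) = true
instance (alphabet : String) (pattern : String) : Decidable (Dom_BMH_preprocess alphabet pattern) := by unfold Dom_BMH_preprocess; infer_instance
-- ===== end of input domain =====

-- B replaces A's two-pass overwrite construction of the bad-character table by one guarded
-- pass with closed-form shifts via rfind (objective: alternative; identical return values).

-- ===== PORT A =====
def BMH_preprocess (alphabet : String) (pattern : String) : List (String × Int) :=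
  let T : PySem.Dict String Int := PySem.Dict.empty
  let pattern_len : Int := PySem.Str.len pattern
  let T := alphabet.toList.foldl (fun T i => T.insert (String.ofList [i]) pattern_len) T
  -- pattern[i] is in range for every i in range(pattern_len - 1), so pyGetD is exact here
  let T := (PySem.List.pyRange 0 (pattern_len - 1) 1).foldl
      (fun T i => T.insert (String.ofList [PySem.List.pyGetD pattern.toList i ' ']) (pattern_len - 1 - i)) T
  T.items

-- ===== PORT B =====
def BMH_preprocess_alt (alphabet : String) (pattern : String) : List (String × Int) :=
  let m : Int := PySem.Str.len pattern
  let body : String := PySem.Str.slice pattern none (some (m - 1))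
  let T := (alphabet ++ body).toList.foldl
      (fun T c =>
        if T.contains (String.ofList [c]) then T
        else
          let r : Int := PySem.Str.rfind body (String.ofList [c])
          T.insert (String.ofList [c]) (if 0 ≤ r then m - 1 - r else m))
      (PySem.Dict.empty : PySem.Dict String Int)
  T.items

-- ===== PRECONDITION & SPEC =====
def Spec_BMH_preprocess (alphabet : String) (pattern : String) (out : List (String × Int)) : Prop := out = BMH_preprocess_alt alphabet pattern
instance (alphabet : String) (pattern : String) (out : List (String × Int)) : Decidable (Spec_BMH_preprocess alphabet pattern out) := by unfold Spec_BMH_preprocess; infer_instance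

-- ===== CLAIM (what is proved, stated in full; the proofs are below) =====
def Claim_equal_BMH_preprocess : Prop := ∀ (alphabet : String) (pattern : String), Dom_BMH_preprocess alphabet pattern → Spec_BMH_preprocess alphabet pattern (BMH_preprocess alphabet pattern)

-- ===== LEMMAS AND PROOFS =====

theorem pvMkBeq (c c' : Char) : (String.ofList [c] == String.ofList [c']) = (c == c') := by
  simp [beq_iff_eq, String.ofList_inj]

theorem pvSingletonIsPrefixOf (c : Char) (l : List Char) :
    [c].isPrefixOf l = (l[0]? == some c) := by
  cases l with
  | nil => simp [List.isPrefixOf]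
  | cons h t => simp [List.isPrefixOf, BEq.comm]

theorem pvRfindGoEq (bl : List Char) (c : Char) :
    ∀ x : Nat, PySem.Chars.rfind.go bl [c] x
      = match (List.range (x+1)).reverse.find? (fun j => bl[j]? == some c) with
        | some j => (j : Int)
        | none => -1 := by
  intro x
  induction x with
  | zero =>
      simp only [PySem.Chars.rfind.go, pvSingletonIsPrefixOf]
      simp only [List.range_succ, List.range_zero]
      split <;> simp_all
  | succ n ih =>
      rw [PySem.Chars.rfind.go, pvSingletonIsPrefixOf]
      rw [show List.range (n+1+1) = List.range (n+1) ++ [n+1] from List.range_succ]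
      rw [List.reverse_append]
      simp only [List.reverse_singleton, List.singleton_append, List.find?_cons]
      rw [List.getElem?_drop]
      by_cases h : bl[n+1]? = some c
      · simp [h]
      · simp only [show ((bl[n+1]? == some c)) = false by simpa using h]
        simpa using ih

theorem pvRfindSingle (bl : List Char) (c : Char) :
    PySem.Chars.rfind bl [c]
      = match (List.range bl.length).reverse.find? (fun j => bl[j]? == some c) with
        | some j => (j : Int)
        | none => -1 := by
  rw [show PySem.Chars.rfind bl [c] = PySem.Chars.rfind.go bl [c] bl.length from rfl]
  rw [pvRfindGoEq]
  rw [show List.range (bl.length+1) = List.range bl.length ++ [bl.length] from List.range_succ]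
  rw [List.reverse_append]
  simp


theorem pvFoldlInsertGet {α : Type} (key : α → String) (v : α → Int) :
    ∀ (l : List α) (d : PySem.Dict String Int) (s : String),
      (l.foldl (fun d i => d.insert (key i) (v i)) d).get? s
        = match l.reverse.find? (fun i => key i == s) with
          | some i => some (v i)
          | none => d.get? s := by
  intro l
  induction l with
  | nil => intro d s; simp
  | cons a t ih =>
      intro d s
      simp only [List.foldl_cons, List.reverse_cons, ih]
      rw [List.find?_append]
      cases h : t.reverse.find? (fun i => key i == s) with
      | some j => simp
      | none =>
          simp only [Option.none_or]
          rw [PySem.Dict.get?_insert]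
          by_cases hk : key a = s
          · subst hk; simp
          · have hkb : (key a == s) = false := by simpa using hk
            simp [hkb, if_neg (show ¬ s = key a by simpa [eq_comm] using hk)]

theorem pvFoldlGuardGet {α : Type} (key : α → String) (v : α → Int) :
    ∀ (l : List α) (d : PySem.Dict String Int) (s : String),
      (l.foldl (fun d c => if d.contains (key c) then d else d.insert (key c) (v c)) d).get? s
        = match d.get? s with
          | some w => some w
          | none => (l.find? (fun c => key c == s)).map v := by
  intro l
  induction l with
  | nil => intro d s; cases h : d.get? s <;> simp [h]
  | cons a t ih =>
      intro d s
      simp only [List.foldl_cons]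
      by_cases hk : key a = s
      · subst hk
        by_cases hc : d.contains (key a) = true
        · have hsome : (d.get? (key a)).isSome := by
            rw [← PySem.Dict.contains_eq_isSome_get?]; exact hc
          obtain ⟨w, hw⟩ := Option.isSome_iff_exists.mp hsome
          simp only [hc, if_true, ih, hw]
        · have hnone : d.get? (key a) = none := by
            rw [PySem.Dict.get?_eq_none_iff_contains]; simpa using hc
          simp only [hc, Bool.false_eq_true, if_false, ih, hnone]
          rw [PySem.Dict.get?_insert]
          simp [List.find?_cons]
      · have hkb : (key a == s) = false := by simpa using hk
        by_cases hc : d.contains (key a) = true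
        · simp only [hc, if_true, ih]
          cases h : d.get? s <;> simp [h, List.find?_cons, hkb]
        · simp only [hc, Bool.false_eq_true, if_false, ih]
          rw [PySem.Dict.get?_insert, if_neg (show ¬ s = key a by simpa [eq_comm] using hk)]
          cases h : d.get? s <;> simp [h, List.find?_cons, hkb]

theorem pvFindCongr {α : Type} (p q : α → Bool) :
    ∀ (l : List α), (∀ x ∈ l, p x = q x) → l.find? p = l.find? q := by
  intro l
  induction l with
  | nil => intro _; rfl
  | cons a t ih =>
      intro h
      have ha := h a (by simp)
      simp only [List.find?_cons, ha]
      cases q a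
      · exact ih (fun x hx => h x (by simp [hx]))
      · rfl

theorem pvFindSelf {α : Type} [BEq α] [LawfulBEq α] :
    ∀ (l : List α) (c : α), c ∈ l → l.find? (fun x => x == c) = some c := by
  intro l
  induction l with
  | nil => intro c hc; simp at hc
  | cons a t ih =>
      intro c hc
      by_cases h : a = c
      · subst h; simp
      · have : (a == c) = false := by simpa using h
        simp only [List.find?_cons, this]
        exact ih c ((List.mem_cons.mp hc).resolve_left (fun h' => h h'.symm))

theorem pvFoldlGuardKeys {α : Type} (key : α → String) (v : α → Int) :
    ∀ (l : List α) (d : PySem.Dict String Int),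
      (l.foldl (fun d c => if d.contains (key c) then d else d.insert (key c) (v c)) d).keys
        = PySem.Set.update d.keys (l.map key) := by
  intro l
  induction l with
  | nil => intro d; simp [PySem.Set.update_nil]
  | cons a t ih =>
      intro d
      simp only [List.foldl_cons, List.map_cons, PySem.Set.update_cons]
      by_cases hc : d.contains (key a) = true
      · rw [if_pos hc, ih, PySem.Set.add_of_mem ((PySem.Dict.contains_iff_mem_keys d (key a)).mp hc)]
      · rw [if_neg hc, ih, PySem.Dict.keys_insert_of_not_contains d (v a) (by simpa using hc),
          PySem.Set.add_of_not_mem (fun hm => hc ((PySem.Dict.contains_iff_mem_keys d (key a)).mpr hm))]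

theorem pvMain (L P : List Char) :
    ((PySem.List.pyRange 0 ((P.length : Int) - 1) 1).foldl
        (fun T i => T.insert (String.ofList [PySem.List.pyGetD P i ' ']) ((P.length : Int) - 1 - i))
        (L.foldl (fun T c => T.insert (String.ofList [c]) ((P.length : Int))) PySem.Dict.empty))
      = ((L ++ P.dropLast).foldl
        (fun T c => if T.contains (String.ofList [c]) then T
          else T.insert (String.ofList [c])
            (if 0 ≤ PySem.Chars.rfind P.dropLast [c]
             then (P.length : Int) - 1 - PySem.Chars.rfind P.dropLast [c]
             else (P.length : Int)))
        PySem.Dict.empty) := by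
  have hNbl : P.dropLast.length = P.length - 1 := List.length_dropLast
  have hN : (((P.length : Int) - 1) - 0).toNat = P.length - 1 := by omega
  -- the mapped key list of A's second loop is the key list of the pattern body
  have hK2 : (PySem.List.pyRange 0 ((P.length : Int) - 1) 1).map
        (fun i => String.ofList [PySem.List.pyGetD P i ' '])
      = P.dropLast.map (fun c => String.ofList [c]) := by
    rw [PySem.List.pyRange_one, List.map_map, hN]
    apply List.ext_getElem
    · simp [hNbl]
    · intro k h1 h2
      simp only [List.getElem_map, List.getElem_range, Function.comp]
      have hk : k < P.length - 1 := by simpa using h1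
      have hkP : k < P.length := by omega
      have : PySem.List.pyGetD P ((0 : Int) + (k : Int)) ' ' = P.dropLast[k] := by
        rw [zero_add, PySem.List.pyGetD_natCast, List.getD_eq_getElem P ' ' hkP,
          List.getElem_dropLast]
      rw [this]
  -- keys of both dicts
  have hKA : ((PySem.List.pyRange 0 ((P.length : Int) - 1) 1).foldl
        (fun T i => T.insert (String.ofList [PySem.List.pyGetD P i ' ']) ((P.length : Int) - 1 - i))
        (L.foldl (fun T c => T.insert (String.ofList [c]) ((P.length : Int))) PySem.Dict.empty)).keys
      = PySem.Set.ofList ((L ++ P.dropLast).map (fun c => String.ofList [c])) := by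
    rw [PySem.Dict.keys_foldl_insert_key, PySem.Dict.keys_foldl_insert_key, PySem.Dict.keys_empty,
      PySem.Set.update_nil_left, hK2, List.map_append, PySem.Set.ofList_append]
  have hKB : ((L ++ P.dropLast).foldl
        (fun T c => if T.contains (String.ofList [c]) then T
          else T.insert (String.ofList [c])
            (if 0 ≤ PySem.Chars.rfind P.dropLast [c]
             then (P.length : Int) - 1 - PySem.Chars.rfind P.dropLast [c]
             else (P.length : Int)))
        PySem.Dict.empty).keys
      = PySem.Set.ofList ((L ++ P.dropLast).map (fun c => String.ofList [c])) := by
    rw [pvFoldlGuardKeys, PySem.Dict.keys_empty, PySem.Set.update_nil_left]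
  -- pointwise values
  have hget : ∀ c ∈ L ++ P.dropLast,
      ((PySem.List.pyRange 0 ((P.length : Int) - 1) 1).foldl
        (fun T i => T.insert (String.ofList [PySem.List.pyGetD P i ' ']) ((P.length : Int) - 1 - i))
        (L.foldl (fun T c => T.insert (String.ofList [c]) ((P.length : Int))) PySem.Dict.empty)).get?
          (String.ofList [c])
      = ((L ++ P.dropLast).foldl
        (fun T c => if T.contains (String.ofList [c]) then T
          else T.insert (String.ofList [c])
            (if 0 ≤ PySem.Chars.rfind P.dropLast [c]
             then (P.length : Int) - 1 - PySem.Chars.rfind P.dropLast [c]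
             else (P.length : Int)))
        PySem.Dict.empty).get? (String.ofList [c]) := by
    intro c hc
    have hpred : (fun x => (String.ofList [x] == String.ofList [c])) = (fun x => x == c) :=
      funext (fun x => pvMkBeq x c)
    -- B side
    rw [pvFoldlGuardGet (fun c => String.ofList [c])
      (fun c => if 0 ≤ PySem.Chars.rfind P.dropLast [c]
        then (P.length : Int) - 1 - PySem.Chars.rfind P.dropLast [c] else (P.length : Int))]
    rw [PySem.Dict.get?_empty, hpred, pvFindSelf _ c hc]
    simp only [Option.map_some]
    rw [pvRfindSingle, hNbl]
    -- A side
    rw [pvFoldlInsertGet (fun i => String.ofList [PySem.List.pyGetD P i ' '])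
      (fun i => (P.length : Int) - 1 - i)]
    rw [pvFoldlInsertGet (fun c => String.ofList [c]) (fun _ => (P.length : Int))]
    rw [PySem.Dict.get?_empty, hpred]
    -- A's range find? in body form
    have hfind : (PySem.List.pyRange 0 ((P.length : Int) - 1) 1).reverse.find?
          (fun i => String.ofList [PySem.List.pyGetD P i ' '] == String.ofList [c])
        = ((List.range (P.length - 1)).reverse.find?
            (fun j => P.dropLast[j]? == some c)).map (fun j => (j : Int)) := by
      rw [PySem.List.pyRange_one, hN, ← List.map_reverse, List.find?_map]
      rw [pvFindCongr _ (fun j => P.dropLast[j]? == some c) _ (by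
        intro k hk
        have hk' : k < P.length - 1 := by simpa using hk
        have hkP : k < P.length := by omega
        have hkbl : k < P.dropLast.length := by omega
        simp only [Function.comp, zero_add, PySem.List.pyGetD_natCast, pvMkBeq,
          List.getD_eq_getElem P ' ' hkP, List.getElem?_eq_getElem hkbl,
          List.getElem_dropLast]
        simp)]
      cases (List.range (P.length - 1)).reverse.find? (fun j => P.dropLast[j]? == some c) <;> simp
    rw [hfind]
    cases hF : (List.range (P.length - 1)).reverse.find? (fun j => P.dropLast[j]? == some c) with
    | some j =>
        simp [Int.natCast_nonneg]
    | none =>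
        simp only [Option.map_none]
        rw [if_neg (by norm_num)]
        have hcL : c ∈ L := by
          rcases List.mem_append.mp hc with h | h
          · exact h
          · exfalso
            obtain ⟨k, hk, hkc⟩ := List.getElem_of_mem h
            exact (List.find?_eq_none.mp hF k (by simp; omega))
              (by simp [List.getElem?_eq_getElem hk, hkc])
        rw [pvFindSelf _ c (List.mem_reverse.mpr hcL)]
        simp
  -- assemble
  have hndA := hKA ▸ PySem.Set.nodup_ofList ((L ++ P.dropLast).map (fun c => String.ofList [c]))
  have hndB := hKB ▸ PySem.Set.nodup_ofList ((L ++ P.dropLast).map (fun c => String.ofList [c]))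
  apply PySem.Dict.ext
  rw [PySem.Dict.items_eq_map_keys _ hndA 0, PySem.Dict.items_eq_map_keys _ hndB 0, hKA, hKB]
  apply List.map_congr_left
  intro s hs
  have hs' : s ∈ (L ++ P.dropLast).map (fun c => String.ofList [c]) :=
    (PySem.Set.mem_ofList _ _).mp hs
  obtain ⟨c, hcmem, rfl⟩ := List.mem_map.mp hs'
  rw [PySem.Dict.getD_eq_get?_getD, PySem.Dict.getD_eq_get?_getD, hget c hcmem]

theorem pvBodyToList (pattern : String) :
    (PySem.Str.slice pattern none (some ((pattern.toList.length : Int) - 1))).toList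
      = pattern.toList.dropLast := by
  rw [PySem.Str.toList_slice]
  rcases Nat.eq_zero_or_pos pattern.toList.length with h | h
  · have hnil : pattern.toList = [] := List.length_eq_zero_iff.mp h
    rw [hnil]
    norm_num [PySem.List.slice_to_neg_one]
  · have hc : ((pattern.toList.length : Int) - 1) = ((pattern.toList.length - 1 : Nat) : Int) := by
      omega
    rw [hc]
    simp [PySem.List.slice_to_natCast, List.dropLast_eq_take]

-- ===== VERDICT (by name: the statement is the Claim_ definition above) =====
theorem BMH_preprocess_spec : Claim_equal_BMH_preprocess := by
  intro alphabet pattern _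
  unfold Spec_BMH_preprocess BMH_preprocess BMH_preprocess_alt
  simp only [PySem.Str.rfind_eq, String.toList_ofList, pvBodyToList, String.toList_append,
    PySem.Str.len_eq]
  exact congrArg PySem.Dict.items (pvMain alphabet.toList pattern.toList)
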